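-- pv_equiv track=rewrite | github.com/parthks/bustabit | common_seq.py | longest_seq_from
-- ===== SOURCE A (Python) =====
-- def longest_seq_from(main, check):
--     for n1_check_index in range(0, len(main)):
--         starting_index = n1_check_index
--         check_index = 0
--         while True:
--             main_num = main[starting_index+check_index]
--             check_num = check[check_index]
--             check_index += 1
--
--             if (main_num != check_num):
--                 break
--
--             if (starting_index+check_index) == len(main):
--                 return n1_check_index
-- ===== SOURCE B (Python) =====
-- def longest_seq_from(main, check):
--     # Scan candidate overlap lengths k from longest to shortest; the longest
--     # suffix of main that is a prefix of check gives the smallest index.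
--     # A one-element comparison rejects most candidates before the slice compare.
--     L = len(main)
--     k = min(L, len(check))
--     while k > 0:
--         if main[L-k] == check[0] and main[L-k:] == check[:k]:
--             return L - k
--         k -= 1
--     return None
-- ===== Notes on version B (the rewrite author's own statement) =====
-- stated objective: alternative
-- what changed: B scans candidate overlap lengths downward (longest first) with a one-element quick reject followed by a whole-slice compare main[L-k:] == check[:k], instead of A's forward double loop over start indices with element-by-element matching and early return.
import Mathlib
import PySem

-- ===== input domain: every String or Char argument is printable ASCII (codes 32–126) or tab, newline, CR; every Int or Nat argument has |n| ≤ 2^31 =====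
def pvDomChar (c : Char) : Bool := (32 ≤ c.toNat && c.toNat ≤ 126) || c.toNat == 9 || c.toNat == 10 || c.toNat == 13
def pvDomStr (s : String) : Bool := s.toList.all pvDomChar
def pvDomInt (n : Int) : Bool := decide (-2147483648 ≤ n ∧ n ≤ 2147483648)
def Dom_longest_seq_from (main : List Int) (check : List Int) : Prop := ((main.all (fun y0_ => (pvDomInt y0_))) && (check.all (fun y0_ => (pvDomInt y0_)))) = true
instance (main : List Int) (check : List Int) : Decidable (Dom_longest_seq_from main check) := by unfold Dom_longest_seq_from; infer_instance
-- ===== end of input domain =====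

-- B scans candidate overlap lengths downward comparing whole slices, instead of A's
-- forward double loop over start indices; same asymptotic cost (objective: alternative).

-- ===== PORT A =====
-- inner 'while True' loop of A; fuel is an upper bound on the remaining iterations
-- (the loop ends within main.length steps).  Where Python raises IndexError
-- (pyGet? = none) the port returns none — those inputs are outside Pre_.
def pvInnerA (main check : List Int) (start : Nat) : Nat → Nat → Option Nat
  | _, 0 => none
  | ci, fuel+1 =>
    match PySem.List.pyGet? main ((start : Int) + (ci : Int)),
          PySem.List.pyGet? check (ci : Int) with
    | some m, some c =>
      if m ≠ c then none
      else if start + (ci + 1) = main.length then some start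
      else pvInnerA main check start (ci + 1) fuel
    | _, _ => none

-- 'for n1_check_index in range(0, len(main))' with early return = findSome? over List.range
def longest_seq_from (main : List Int) (check : List Int) : Option Int :=
  (List.range main.length).findSome?
    (fun s => (pvInnerA main check s 0 (main.length + 1)).map Int.ofNat)

-- ===== PORT B =====
-- 'while k > 0: … k -= 1' as recursion on k
-- 'main[L-k] == check[0]' ported as equality of pyGet? results: for 1 ≤ k ≤ min L C
-- (the only values the loop visits) both indices are in range, so this is exact.
def pvGoB (main check : List Int) : Nat → Option Int
  | 0 => none
  | k+1 =>
    if PySem.List.pyGet? main ((main.length : Int) - ((k+1 : Nat) : Int))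
         = PySem.List.pyGet? check 0
       ∧ PySem.List.slice main (some ((main.length : Int) - ((k+1 : Nat) : Int))) none
         = PySem.List.slice check none (some ((k+1 : Nat) : Int))
    then some ((main.length : Int) - ((k+1 : Nat) : Int))
    else pvGoB main check k

def longest_seq_from_alt (main : List Int) (check : List Int) : Option Int :=
  pvGoB main check (min main.length check.length)

-- ===== PRECONDITION & SPEC =====
-- Pre_ excludes exactly the inputs on which Python A raises IndexError: those where,
-- at some start index i, check runs out while still matching inside main (check is a
-- strict prefix of main[i:]) before any earlier start index returned.
def Pre_longest_seq_from (main : List Int) (check : List Int) : Prop :=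
  ∀ i, i < main.length → (check <+: main.drop i ∧ check.length < main.length - i) →
    ∃ j, j < i ∧ main.drop j <+: check
instance (main : List Int) (check : List Int) : Decidable (Pre_longest_seq_from main check) := by
  unfold Pre_longest_seq_from; infer_instance

def pvWitness_longest_seq_from : List Int × List Int := ([1, 2, 3], [3, 4])

def Spec_longest_seq_from (main : List Int) (check : List Int) (out : Option Int) : Prop := out = longest_seq_from_alt main check
instance (main : List Int) (check : List Int) (out : Option Int) : Decidable (Spec_longest_seq_from main check out) := by unfold Spec_longest_seq_from; infer_instance

-- ===== CLAIM (what is proved, stated in full; the proofs are below) =====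
def Claim_equal_longest_seq_from : Prop := ∀ (main : List Int) (check : List Int), Dom_longest_seq_from main check → Pre_longest_seq_from main check → Spec_longest_seq_from main check (longest_seq_from main check)

-- ===== LEMMAS AND PROOFS =====

lemma pvInnerA_eq (main check : List Int) (s : Nat) :
    ∀ fuel ci, s + ci < main.length → main.length - (s + ci) ≤ fuel →
      pvInnerA main check s ci fuel
        = if main.drop (s + ci) <+: check.drop ci then some s else none := by
  intro fuel
  induction fuel with
  | zero => intro ci h1 h2; omega
  | succ fuel ih =>
    intro ci h1 h2
    have hm : PySem.List.pyGet? main ((s : Int) + (ci : Int)) = some main[s + ci] := by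
      have hcast : ((s : Int) + (ci : Int)) = ((s + ci : Nat) : Int) := by push_cast; ring
      rw [hcast, PySem.List.pyGet?_natCast, List.getElem?_eq_getElem h1]
    have hdm : main.drop (s + ci) = main[s + ci] :: main.drop (s + ci + 1) :=
      List.drop_eq_getElem_cons h1
    rw [pvInnerA, hm]
    by_cases hc : ci < check.length
    · have hk : PySem.List.pyGet? check (ci : Int) = some check[ci] := by
        rw [PySem.List.pyGet?_natCast, List.getElem?_eq_getElem hc]
      have hdc : check.drop ci = check[ci] :: check.drop (ci + 1) :=
        List.drop_eq_getElem_cons hc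
      rw [hk]
      by_cases heq : main[s + ci] = check[ci]
      · simp only [heq, ne_eq, not_true_eq_false, if_false]
        by_cases hend : s + (ci + 1) = main.length
        · have hdm2 : main.drop (s + ci + 1) = [] := by
            have : main.length ≤ s + ci + 1 := by omega
            exact List.drop_eq_nil_of_le this
          rw [if_pos hend, hdm, hdc, hdm2]
          rw [if_pos]
          exact (List.cons_prefix_cons).mpr ⟨heq, List.nil_prefix⟩
        · rw [if_neg hend]
          have h1' : s + (ci + 1) < main.length := by omega
          have h2' : main.length - (s + (ci + 1)) ≤ fuel := by omega
          rw [ih (ci + 1) h1' h2']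
          have : (main.drop (s + ci) <+: check.drop ci)
              ↔ (main.drop (s + (ci + 1)) <+: check.drop (ci + 1)) := by
            rw [hdm, hdc, List.cons_prefix_cons]
            constructor
            · rintro ⟨-, h⟩
              simpa [Nat.add_assoc] using h
            · intro h
              exact ⟨heq, by simpa [Nat.add_assoc] using h⟩
          simp only [this]
      · simp only [ne_eq, heq, not_false_eq_true, if_true]
        rw [hdm, hdc, if_neg]
        intro hpre
        exact heq ((List.cons_prefix_cons).mp hpre).1
    · have hk : PySem.List.pyGet? check (ci : Int) = none := by
        rw [PySem.List.pyGet?_natCast]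
        exact List.getElem?_eq_none (by omega)
      rw [hk]
      have hdc : check.drop ci = [] := List.drop_eq_nil_of_le (by omega)
      have hnp : ¬ (main.drop (s + ci) <+: check.drop ci) := by
        rw [hdc, hdm]
        intro hpre
        exact List.cons_ne_nil _ _ (List.prefix_nil.mp hpre)
      rw [if_neg hnp]

lemma findSome?_congr {α β : Type} (f g : α → Option β) :
    ∀ l : List α, (∀ a ∈ l, f a = g a) → l.findSome? f = l.findSome? g := by
  intro l
  induction l with
  | nil => intro _; rfl
  | cons a l ih =>
    intro h
    rw [List.findSome?_cons, List.findSome?_cons, h a (by simp)]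
    cases g a with
    | some b => rfl
    | none => exact ih (fun x hx => h x (by simp [hx]))

lemma pvA_char (main check : List Int) :
    longest_seq_from main check
      = (List.range main.length).findSome?
          (fun s => if main.drop s <+: check then some (Int.ofNat s) else none) := by
  unfold longest_seq_from
  apply findSome?_congr
  intro s hs
  have hs' : s < main.length := List.mem_range.mp hs
  rw [pvInnerA_eq main check s (main.length + 1) 0 (by omega) (by omega)]
  by_cases h : main.drop s <+: check
  · have h' : main.drop (s + 0) <+: check.drop 0 := by simpa using h
    rw [if_pos h', if_pos h]; rfl
  · have h' : ¬ (main.drop (s + 0) <+: check.drop 0) := by simpa using h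
    rw [if_neg h', if_neg h]; rfl

lemma findSome?_range_if (p : Nat → Prop) [DecidablePred p] (v : Nat → Int) :
    ∀ (L : Nat) (s0 : Nat), s0 < L → p s0 → (∀ t, t < s0 → ¬ p t) →
      (List.range L).findSome? (fun s => if p s then some (v s) else none) = some (v s0) := by
  intro L
  induction L with
  | zero => intro s0 h; omega
  | succ L ih =>
    intro s0 hlt hP hmin
    rw [List.range_succ, List.findSome?_append]
    by_cases h : s0 < L
    · rw [ih s0 h hP hmin]; rfl
    · have hs0 : s0 = L := by omega
      have hnone : (List.range L).findSome?
          (fun s => if p s then some (v s) else none) = none := by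
        rw [List.findSome?_eq_none_iff]
        intro a ha
        rw [if_neg (hmin a (by have := List.mem_range.mp ha; omega))]
      rw [hnone]
      subst hs0
      simp [List.findSome?, hP]

lemma findSome?_range_none_if (p : Nat → Prop) [DecidablePred p] (v : Nat → Int) (L : Nat)
    (h : ∀ s, s < L → ¬ p s) :
    (List.range L).findSome? (fun s => if p s then some (v s) else none) = none := by
  rw [List.findSome?_eq_none_iff]
  intro a ha
  rw [if_neg (h a (List.mem_range.mp ha))]

-- the slice test of B, for 1 ≤ k ≤ min L C, is exactly the suffix-prefix match at index L - k
lemma pvCond_iff (main check : List Int) (k : Nat)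
    (hk1 : 1 ≤ k) (hkL : k ≤ main.length) (hkC : k ≤ check.length) :
    (PySem.List.pyGet? main ((main.length : Int) - (k : Int))
         = PySem.List.pyGet? check 0
      ∧ PySem.List.slice main (some ((main.length : Int) - (k : Int))) none
         = PySem.List.slice check none (some ((k : Nat) : Int)))
      ↔ main.drop (main.length - k) <+: check := by
  have hcast : ((main.length : Int) - (k : Int)) = ((main.length - k : Nat) : Int) := by
    push_cast [hkL]; ring
  rw [hcast, PySem.List.slice_from_natCast, PySem.List.slice_to_natCast,
      PySem.List.pyGet?_natCast, PySem.List.pyGet?_zero]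
  constructor
  · rintro ⟨-, h⟩
    rw [h]
    exact List.take_prefix k check
  · intro h
    have hlen : (main.drop (main.length - k)).length = k := by
      rw [List.length_drop]; omega
    have heq : main.drop (main.length - k) = check.take k := by
      have := List.prefix_iff_eq_take.mp h
      rwa [hlen] at this
    refine ⟨?_, heq⟩
    have h0 := congrArg (fun l : List Int => l[0]?) heq
    simp only [List.getElem?_drop, Nat.add_zero] at h0
    rwa [List.getElem?_take, if_pos (by omega : 0 < k)] at h0

lemma pvGoB_none (main check : List Int)
    (h : ∀ s, s < main.length → ¬ main.drop s <+: check) :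
    ∀ k, k ≤ min main.length check.length → pvGoB main check k = none := by
  intro k
  induction k with
  | zero => intro _; rfl
  | succ k ih =>
    intro hk
    rw [pvGoB, if_neg, ih (by omega)]
    intro hc
    have hp := (pvCond_iff main check (k + 1) (by omega) (by omega) (by omega)).mp hc
    exact h (main.length - (k + 1)) (by omega) hp

lemma pvGoB_some (main check : List Int) (s0 : Nat)
    (hlt : s0 < main.length) (hP : main.drop s0 <+: check)
    (hmin : ∀ t, t < s0 → ¬ main.drop t <+: check) :
    ∀ k, main.length - s0 ≤ k → k ≤ min main.length check.length →
      pvGoB main check k = some (Int.ofNat s0) := by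
  intro k
  induction k with
  | zero => intro h1 h2; omega
  | succ k ih =>
    intro h1 h2
    by_cases he : main.length - s0 = k + 1
    · have hs : main.length - (k + 1) = s0 := by omega
      have hP' : main.drop (main.length - (k + 1)) <+: check := by rw [hs]; exact hP
      rw [pvGoB, if_pos ((pvCond_iff main check (k + 1) (by omega) (by omega)
            (by omega)).mpr hP')]
      have hv : (main.length : Int) - ((k + 1 : Nat) : Int) = Int.ofNat s0 := by
        rw [Int.ofNat_eq_natCast]; omega
      rw [hv]
    · have hcond : ¬ (PySem.List.pyGet? main
            ((main.length : Int) - ((k + 1 : Nat) : Int)) = PySem.List.pyGet? check 0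
          ∧ PySem.List.slice main
            (some ((main.length : Int) - ((k + 1 : Nat) : Int))) none
            = PySem.List.slice check none (some ((k + 1 : Nat) : Int))) := by
        intro hc
        have hp := (pvCond_iff main check (k + 1) (by omega) (by omega) (by omega)).mp hc
        exact hmin (main.length - (k + 1)) (by omega) hp
      rw [pvGoB, if_neg hcond]
      exact ih (by omega) (by omega)

-- ===== VERDICT (by name: the statement is the Claim_ definition above) =====
theorem longest_seq_from_spec : Claim_equal_longest_seq_from := by
  intro main check _ _
  unfold Spec_longest_seq_from longest_seq_from_alt
  rw [pvA_char]
  letI : DecidablePred (fun s => main.drop s <+: check) := fun _ => inferInstance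
  have hex : ∃ s, main.drop s <+: check :=
    ⟨main.length, by simp [List.drop_eq_nil_of_le (le_refl main.length)]⟩
  set s0 := Nat.find hex with hs0def
  have hP : main.drop s0 <+: check := Nat.find_spec hex
  have hmin : ∀ t, t < s0 → ¬ main.drop t <+: check := fun t ht => Nat.find_min hex ht
  by_cases hlt : s0 < main.length
  · have hC : main.length - s0 ≤ check.length := by
      have := hP.length_le
      rw [List.length_drop] at this
      omega
    rw [findSome?_range_if (fun s => main.drop s <+: check) (fun s => Int.ofNat s) main.length s0 hlt hP hmin]
    exact (pvGoB_some main check s0 hlt hP hmin (min main.length check.length)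
      (by omega) (le_refl _)).symm
  · have hall : ∀ s, s < main.length → ¬ main.drop s <+: check := by
      intro s hs
      exact hmin s (by omega)
    rw [findSome?_range_none_if (fun s => main.drop s <+: check) (fun s => Int.ofNat s) main.length hall]
    exact (pvGoB_none main check hall (min main.length check.length) (le_refl _)).symm
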